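-- pv_equiv track=rewrite | github.com/ahmetmeleq/Dynamic-Programming | 2 - SuffixQuery.py | count_former
-- ===== SOURCE A (Python) =====
-- def count_former(recurrent_list):
--     memory = []
--     unique_count_list = []
--     count = 0
--     for item in recurrent_list[::-1]:
--         if not item in memory:
--             count = count + 1
--             memory.append(item)
--         unique_count_list.append(count)
--     return unique_count_list[::-1], count
-- ===== SOURCE B (Python) =====
-- def count_former(recurrent_list):
--     # pass 1: last-occurrence index of every value
--     last = {}
--     for i, x in enumerate(recurrent_list):
--         last[x] = i
--     # pass 2: suffix-sum of "i is the last occurrence" indicators, filled back-to-front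
--     n = len(recurrent_list)
--     unique_count_list = [0] * n
--     count = 0
--     for i in range(n - 1, -1, -1):
--         if last[recurrent_list[i]] == i:
--             count += 1
--         unique_count_list[i] = count
--     return unique_count_list, len(last)
-- ===== Notes on version B (the rewrite author's own statement) =====
-- stated objective: faster
-- what changed: Replaces A's single reverse scan that keeps a growing membership list (linear scan per element) with two passes: a dict of last-occurrence indices built forward, then a reverse suffix-sum of 'i is the last occurrence' indicators filling the output array back-to-front.
import Mathlib
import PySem

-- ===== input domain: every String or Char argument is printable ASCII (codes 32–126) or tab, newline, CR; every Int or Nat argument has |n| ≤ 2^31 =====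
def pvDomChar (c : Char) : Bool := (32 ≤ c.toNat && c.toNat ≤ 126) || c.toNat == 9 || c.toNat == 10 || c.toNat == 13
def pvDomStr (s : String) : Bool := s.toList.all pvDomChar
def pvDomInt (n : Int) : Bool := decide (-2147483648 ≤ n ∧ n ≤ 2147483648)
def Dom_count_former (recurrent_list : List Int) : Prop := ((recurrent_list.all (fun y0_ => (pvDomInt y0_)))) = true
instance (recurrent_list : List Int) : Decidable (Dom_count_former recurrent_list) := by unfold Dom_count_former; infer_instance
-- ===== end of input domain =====

-- B computes the same suffix distinct-counts with a last-occurrence table and a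
-- reverse suffix-sum pass instead of A's per-element membership scan (objective: faster).

-- ===== PORT A =====
-- loop body of A: membership test on 'memory', conditional append, append count
def pvStepA (s : List Int × List Int × Int) (item : Int) : List Int × List Int × Int :=
  if item ∈ s.1 then (s.1, s.2.1 ++ [s.2.2], s.2.2)
  else (s.1 ++ [item], s.2.1 ++ [s.2.2 + 1], s.2.2 + 1)

def count_former (recurrent_list : List Int) : List Int × Int :=
  -- 'recurrent_list[::-1]' is List.reverse (PySem.List.slice?_none_none_neg_one)
  let st := recurrent_list.reverse.foldl pvStepA ([], [], 0)
  (st.2.1.reverse, st.2.2)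

-- ===== PORT B =====
-- loop body of B's second pass: 'unique_count_list[i] = count' with i descending
-- builds the list front-to-back, so it prepends; 'last[recurrent_list[i]]' is exact
-- as getD since i indexes recurrent_list, whose every element is a key of 'last'.
def pvStepB (l : List Int) (last : PySem.Dict Int Int) (s : Int × List Int) (i : Int) :
    Int × List Int :=
  let count := if last.getD (PySem.List.pyGetD l i 0) 0 = i then s.1 + 1 else s.1
  (count, count :: s.2)

def count_former_alt (recurrent_list : List Int) : List Int × Int :=
  let last := (PySem.List.enumerate recurrent_list 0).foldl
    (fun (d : PySem.Dict Int Int) p => d.insert p.2 p.1) PySem.Dict.empty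
  let n : Int := recurrent_list.length
  let st := (PySem.List.pyRange (n - 1) (-1) (-1)).foldl
    (pvStepB recurrent_list last) (0, [])
  (st.2, (last.size : Int))

-- ===== PRECONDITION & SPEC =====
def Spec_count_former (recurrent_list : List Int) (out : List Int × Int) : Prop := out = count_former_alt recurrent_list
instance (recurrent_list : List Int) (out : List Int × Int) : Decidable (Spec_count_former recurrent_list out) := by unfold Spec_count_former; infer_instance

-- ===== CLAIM (what is proved, stated in full; the proofs are below) =====
def Claim_equal_count_former : Prop := ∀ (recurrent_list : List Int), Dom_count_former recurrent_list → Spec_count_former recurrent_list (count_former recurrent_list)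

-- ===== LEMMAS AND PROOFS =====

-- the last-occurrence dict built by B's first pass
def pvLast (l : List Int) : PySem.Dict Int Int :=
  (PySem.List.enumerate l 0).foldl
    (fun (d : PySem.Dict Int Int) p => d.insert p.2 p.1) PySem.Dict.empty

lemma pvLast_append (t : List Int) (x : Int) :
    pvLast (t ++ [x]) = (pvLast t).insert x (t.length : Int) := by
  unfold pvLast
  rw [PySem.List.enumerate_append, List.foldl_append]
  simp [PySem.List.enumerate_cons, PySem.List.enumerate_nil]

lemma getD_pvLast (l : List Int) :
    ∀ (k : Nat) (hk : k < l.length),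
      ((pvLast l).getD l[k] 0 = (k : Int)) ↔ l[k] ∉ l.drop (k + 1) := by
  induction l using List.reverseRecOn with
  | nil => intro k hk; simp at hk
  | append_singleton t x ih =>
    intro k hk
    rw [pvLast_append, PySem.Dict.getD_insert]
    rcases Nat.lt_succ_iff_lt_or_eq.mp (by simpa using hk) with hlt | heq
    · have hget : (t ++ [x])[k] = t[k] := List.getElem_append_left hlt
      have hdrop : (t ++ [x]).drop (k + 1) = t.drop (k + 1) ++ [x] :=
        List.drop_append_of_le_length (by omega)
      rw [hget, hdrop]
      by_cases hx : t[k] = x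
      · constructor
        · intro h; rw [if_pos hx] at h
          exfalso; omega
        · intro h; exfalso; exact h (by simp [hx])
      · rw [if_neg hx, ih k hlt]
        simp [hx]
    · subst heq
      have hget : (t ++ [x])[t.length] = x := by simp
      have hdrop : (t ++ [x]).drop (t.length + 1) = ([] : List Int) := by
        apply List.drop_eq_nil_of_le; simp
      rw [hget, hdrop, if_pos rfl]
      simp

lemma size_pvLast (l : List Int) :
    (pvLast l).size = (PySem.Set.ofList l).length := by
  have hk : (pvLast l).keys = PySem.Set.update [] ((PySem.List.enumerate l 0).map (·.2)) := by
    unfold pvLast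
    exact PySem.Dict.keys_foldl_insert_key (PySem.List.enumerate l 0) (·.2) (fun d p => p.1) _
  have : (pvLast l).keys = PySem.Set.ofList l := by
    rw [hk, PySem.List.map_snd_enumerate, PySem.Set.update_nil_left]
  have hsz : (pvLast l).size = (pvLast l).keys.length := by
    simp [PySem.Dict.size, PySem.Dict.keys]
  rw [hsz, this]

lemma pvMain (l : List Int) (d : PySem.Dict Int Int)
    (hd : ∀ (k : Nat) (hk : k < l.length),
      (d.getD l[k] 0 = (k : Int)) ↔ l[k] ∉ l.drop (k + 1)) :
    ∀ (k : Nat), k ≤ l.length → ∀ (m : List Int) (c : Int) (u res : List Int),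
      m.Nodup → c = (m.length : Int) → (∀ y, y ∈ m ↔ y ∈ l.drop k) →
      ∃ (w mA : List Int) (cA : Int),
        ((l.take k).reverse.foldl pvStepA (m, u, c) = (mA, u ++ w, cA)) ∧
        ((PySem.List.pyRange ((k : Int) - 1) (-1) (-1)).foldl (pvStepB l d) (c, res)
            = (cA, w.reverse ++ res)) ∧
        mA.Nodup ∧ cA = (mA.length : Int) ∧ (∀ y, y ∈ mA ↔ y ∈ l) := by
  intro k
  induction k with
  | zero =>
    intro _ m c u res hnd hc hm
    refine ⟨[], m, c, ?_, ?_, hnd, hc, ?_⟩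
    · simp
    · rw [PySem.List.pyRange_neg_one_eq_nil (by omega)]; simp
    · simpa using hm
  | succ k ih =>
    intro hk m c u res hnd hc hm
    have hklt : k < l.length := by omega
    have htake : (l.take (k + 1)).reverse = l[k] :: (l.take k).reverse := by
      rw [List.take_add_one, List.getElem?_eq_getElem hklt]
      simp
    have hrange : PySem.List.pyRange ((↑(k + 1) : Int) - 1) (-1) (-1)
        = (k : Int) :: PySem.List.pyRange ((k : Int) - 1) (-1) (-1) := by
      have : ((↑(k + 1) : Int) - 1) = (k : Int) := by push_cast; ring
      rw [this, PySem.List.pyRange_neg_one_cons (by omega)]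
    have hgetD : PySem.List.pyGetD l (k : Int) 0 = l[k] := by
      rw [PySem.List.pyGetD_natCast]
      simp [List.getD, List.getElem?_eq_getElem hklt]
    have hdropk : l.drop k = l[k] :: l.drop (k + 1) := List.drop_eq_getElem_cons hklt
    have hcond : (d.getD l[k] 0 = (k : Int)) ↔ l[k] ∉ l.drop (k + 1) := hd k hklt
    rw [htake, hrange]
    simp only [List.foldl_cons]
    by_cases hmem : l[k] ∈ l.drop (k + 1)
    · -- seen later: A keeps memory, B's indicator is false
      have hA : pvStepA (m, u, c) l[k] = (m, u ++ [c], c) := by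
        have : l[k] ∈ m := (hm _).mpr hmem
        simp [pvStepA, this]
      have hB : pvStepB l d (c, res) (k : Int) = (c, c :: res) := by
        have : ¬ (d.getD l[k] 0 = (k : Int)) := by rw [hcond]; simpa using hmem
        simp [pvStepB, hgetD, this]
      rw [hA, hB]
      obtain ⟨w, mA, cA, h1, h2, h3, h4, h5⟩ :=
        ih (by omega) m c (u ++ [c]) (c :: res) hnd hc
          (by intro y
              rw [hm y, hdropk, List.mem_cons]
              constructor
              · exact Or.inr
              · rintro (rfl | h)
                · exact hmem
                · exact h)
      refine ⟨c :: w, mA, cA, ?_, ?_, h3, h4, h5⟩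
      · rw [h1]; simp
      · rw [h2]; simp
    · -- last occurrence: A adds to memory, B's indicator is true
      have hA : pvStepA (m, u, c) l[k] = (m ++ [l[k]], u ++ [c + 1], c + 1) := by
        have : l[k] ∉ m := fun h => hmem ((hm _).mp h)
        simp [pvStepA, this]
      have hB : pvStepB l d (c, res) (k : Int) = (c + 1, (c + 1) :: res) := by
        have : d.getD l[k] 0 = (k : Int) := hcond.mpr hmem
        simp [pvStepB, hgetD, this]
      rw [hA, hB]
      obtain ⟨w, mA, cA, h1, h2, h3, h4, h5⟩ :=
        ih (by omega) (m ++ [l[k]]) (c + 1) (u ++ [c + 1]) ((c + 1) :: res)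
          (by have hnotm : l[k] ∉ m := fun h => hmem ((hm _).mp h)
              simp [List.nodup_append, hnd]
              intro a ha rfl
              exact hnotm ha)
          (by simp [hc])
          (by intro y
              rw [hdropk]
              simp only [List.mem_append, List.mem_cons, hm y]
              tauto)
      refine ⟨(c + 1) :: w, mA, cA, ?_, ?_, h3, h4, h5⟩
      · rw [h1]; simp
      · rw [h2]; simp

-- ===== VERDICT (by name: the statement is the Claim_ definition above) =====
theorem count_former_spec : Claim_equal_count_former := by
  intro l _
  unfold Spec_count_former count_former count_former_alt
  obtain ⟨w, mA, cA, h1, h2, h3, h4, h5⟩ :=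
    pvMain l (pvLast l) (getD_pvLast l) l.length (le_refl _) [] 0 [] []
      List.nodup_nil (by simp) (by simp)
  rw [List.take_length] at h1
  have hsize : cA = ((pvLast l).size : Int) := by
    rw [size_pvLast, h4]
    congr 1
    exact ((List.perm_ext_iff_of_nodup h3 (PySem.Set.nodup_ofList l)).mpr
      (by intro y; rw [h5 y]; simp [PySem.Set.mem_ofList])).length_eq
  show (_, _) = (_, _)
  rw [show pvLast l = (PySem.List.enumerate l 0).foldl
      (fun (d : PySem.Dict Int Int) p => d.insert p.2 p.1) PySem.Dict.empty from rfl] at h2 hsize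
  rw [h1, h2]
  simp [hsize]
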